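-- pv_equiv track=rewrite | github.com/ironsupr/YT-AI-AGENT | src/module_generator.py | _extract_module_objectives
-- ===== SOURCE A (Python) =====
-- from typing import Dict, List, Optional, Any
--
-- def _extract_module_objectives(videos: List[Dict]) -> List[str]:
--     """Extract learning objectives for a module.
--
--     Args:
--         videos: Videos in the module
--
--     Returns:
--         List of module objectives
--     """
--     objectives = []
--
--     for video in videos:
--         video_objectives = video.get('learning_outcomes', [])
--         for objective in video_objectives:
--             if objective not in objectives:
--                 objectives.append(objective)
--
--     # Limit to 5 most important objectives
--     return objectives[:5]
-- ===== SOURCE B (Python) =====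
-- from typing import Dict, List
--
-- def _extract_module_objectives(videos: List[Dict]) -> List[str]:
--     """Select-and-filter recursion: take the head of the remaining outcome stream,
--     remove its duplicates from the rest, recurse with the budget decremented,
--     stopping as soon as 5 objectives are chosen (no membership scans at all)."""
--     stream = [o for v in videos for o in v.get('learning_outcomes', [])]
--
--     def first_distinct(xs, k):
--         if k == 0 or not xs:
--             return []
--         head = xs[0]
--         return [head] + first_distinct([x for x in xs[1:] if x != head], k - 1)
--
--     return first_distinct(stream, 5)
-- ===== Notes on version B (the rewrite author's own statement) =====
-- stated objective: alternative
-- what changed: Replaces A's accumulator loop with its per-element 'not in' scan over the growing result by a select-and-filter recursion (quickselect-style nub): take the head of the flattened outcome stream, filter its duplicates out of the tail, recurse with a budget that starts at 5, so the recursion terminates as soon as 5 distinct objectives are found and no membership test on the result is ever made.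
import Mathlib
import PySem

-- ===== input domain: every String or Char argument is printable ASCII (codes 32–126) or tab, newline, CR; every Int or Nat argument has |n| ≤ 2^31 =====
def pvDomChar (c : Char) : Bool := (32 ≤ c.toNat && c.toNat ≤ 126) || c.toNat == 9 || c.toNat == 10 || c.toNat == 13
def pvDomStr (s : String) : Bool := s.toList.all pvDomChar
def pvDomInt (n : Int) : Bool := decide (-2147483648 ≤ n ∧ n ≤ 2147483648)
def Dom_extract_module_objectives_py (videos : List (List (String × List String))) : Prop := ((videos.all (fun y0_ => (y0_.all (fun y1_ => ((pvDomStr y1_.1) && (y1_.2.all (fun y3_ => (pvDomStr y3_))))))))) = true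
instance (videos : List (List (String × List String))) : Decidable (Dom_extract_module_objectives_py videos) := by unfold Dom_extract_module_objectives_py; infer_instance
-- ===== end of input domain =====

-- B replaces A's accumulator loop (per-element 'not in' scan over the growing result, then [:5])
-- by a select-and-filter recursion on the flattened stream with a budget of 5 (objective: alternative).

-- ===== PORT A =====
-- accumulator loop: for video in videos / for objective in video_objectives: if not in, append; then objectives[:5]
def extract_module_objectives_py (videos : List (List (String × List String))) : List String :=
  let objectives :=
    videos.foldl
      (fun objectives video =>
        let video_objectives := PySem.Dict.getD (PySem.Dict.mk video) "learning_outcomes" []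
        video_objectives.foldl
          (fun objs objective => if objective ∈ objs then objs else objs ++ [objective])
          objectives)
      []
  PySem.List.slice objectives none (some 5)

-- ===== PORT B =====
-- first_distinct(xs, k): if k == 0 or not xs: []; else [head] + first_distinct([x for x in xs[1:] if x != head], k-1)
def firstDistinct : Nat → List String → List String
  | 0, _ => []
  | _ + 1, [] => []
  | k + 1, head :: rest => head :: firstDistinct k (rest.filter (fun x => x ≠ head))

-- stream = [o for v in videos for o in v.get('learning_outcomes', [])]; return first_distinct(stream, 5)
def extract_module_objectives_py_alt (videos : List (List (String × List String))) : List String :=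
  let stream := videos.flatMap (fun v => PySem.Dict.getD (PySem.Dict.mk v) "learning_outcomes" [])
  firstDistinct 5 stream

-- ===== PRECONDITION & SPEC =====
def Spec_extract_module_objectives_py (videos : List (List (String × List String))) (out : List String) : Prop := out = extract_module_objectives_py_alt videos
instance (videos : List (List (String × List String))) (out : List String) : Decidable (Spec_extract_module_objectives_py videos out) := by unfold Spec_extract_module_objectives_py; infer_instance

-- ===== CLAIM (what is proved, stated in full; the proofs are below) =====
def Claim_equal_extract_module_objectives_py : Prop := ∀ (videos : List (List (String × List String))), Dom_extract_module_objectives_py videos → Spec_extract_module_objectives_py videos (extract_module_objectives_py videos)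

-- ===== LEMMAS AND PROOFS =====

-- unbounded select-and-filter dedup, used only to relate the two programs
def nubF : List String → List String
  | [] => []
  | h :: t => h :: nubF (t.filter (fun x => x ≠ h))
termination_by l => l.length
decreasing_by
  have hle := List.length_filter_le (fun x => !decide ((x : {x // x ∈ t}).1 = h)) t.attach
  simp at hle ⊢
  omega

theorem nubF_nil : nubF [] = [] := by rw [nubF.eq_def]
theorem nubF_cons (h : String) (t : List String) :
    nubF (h :: t) = h :: nubF (t.filter (fun x => x ≠ h)) := by rw [nubF.eq_def]

-- the nested loop over videos equals one fold over the flattened outcome list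
theorem foldl_nested_eq_flatMap (f : List String → String → List String)
    (g : List (String × List String) → List String)
    (vs : List (List (String × List String))) (init : List String) :
    vs.foldl (fun a v => (g v).foldl f a) init = (vs.flatMap g).foldl f init := by
  induction vs generalizing init with
  | nil => rfl
  | cons v vs ih => simp [List.foldl_append, ih]

-- A's append-if-new fold is 'acc' followed by the select-and-filter dedup of the unseen elements
theorem foldl_appendIf_eq_nubF (xs acc : List String) :
    xs.foldl (fun a x => if x ∈ a then a else a ++ [x]) acc
      = acc ++ nubF (xs.filter (fun x => x ∉ acc)) := by
  induction xs generalizing acc with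
  | nil => simp [nubF_nil]
  | cons h t ih =>
    by_cases hm : h ∈ acc
    · simp [hm, ih]
    · have hf : t.filter (fun x => x ∉ acc ++ [h])
          = (t.filter (fun x => x ∉ acc)).filter (fun x => x ≠ h) := by
        simp only [List.filter_filter]
        refine List.filter_congr (fun x _ => ?_)
        simp [and_comm]
      simp only [List.foldl_cons, if_neg hm, ih, hf]
      simp [nubF_cons, hm, List.filter_filter]

-- the budgeted recursion is 'take k' of the unbounded one
theorem firstDistinct_eq_take_nubF (k : Nat) (xs : List String) :
    firstDistinct k xs = (nubF xs).take k := by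
  induction k generalizing xs with
  | zero => simp [firstDistinct]
  | succ k ih =>
    cases xs with
    | nil => simp [firstDistinct, nubF_nil]
    | cons h t => simp [firstDistinct, nubF_cons, ih]

-- ===== VERDICT (by name: the statement is the Claim_ definition above) =====
theorem extract_module_objectives_py_spec : Claim_equal_extract_module_objectives_py := by
  intro videos _
  unfold Spec_extract_module_objectives_py extract_module_objectives_py extract_module_objectives_py_alt
  rw [foldl_nested_eq_flatMap, foldl_appendIf_eq_nubF, PySem.List.slice_to _ (by norm_num),
    firstDistinct_eq_take_nubF]
  simp
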